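-- pv_equiv track=rewrite | github.com/YuliaMoshan/dl-chessboard-reconstruction | scripts/05_inference_and_fen_reconstruction.py | labels_to_board_fen
-- ===== SOURCE A (Python) =====
-- def labels_to_board_fen(labels_64):
--     """
--     Convert 64 labels (a8 -> h1) to board-only FEN.
--     'X' is treated as empty.
--     """
--     fen = ""
--     empty = 0
--     for i, lbl in enumerate(labels_64):
--         if lbl in ("empty", "X"):
--             empty += 1
--         else:
--             if empty:
--                 fen += str(empty)
--                 empty = 0
--             fen += lbl
--         if (i + 1) % 8 == 0:
--             if empty:
--                 fen += str(empty)
--                 empty = 0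
--             if i != 63:
--                 fen += "/"
--     return fen
-- ===== SOURCE B (Python) =====
-- def labels_to_board_fen(labels_64):
--     """
--     Convert 64 labels (a8 -> h1) to board-only FEN.
--     'X' is treated as empty.
--     """
--     n = len(labels_64)
--     bounds = [8 * k for k in range(1, n // 8 + 1)]          # rank ends
--     pieces = [(i, lbl) for i, lbl in enumerate(labels_64)
--               if lbl not in ("empty", "X")]                 # occupied squares
--     out = []
--     run = 0      # first square not yet encoded; squares run..pos-1 are empty
--     b = p = 0
--     while b < len(bounds) or p < len(pieces):
--         if p == len(pieces) or (b < len(bounds) and bounds[b] <= pieces[p][0]):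
--             pos = bounds[b]
--             b += 1
--             if pos > run:
--                 out.append(str(pos - run))
--             if pos != 64:    # no '/' after the board's last rank
--                 out.append("/")
--             run = pos
--         else:
--             pos, lbl = pieces[p]
--             p += 1
--             if pos > run:
--                 out.append(str(pos - run))
--             out.append(lbl)
--             run = pos + 1
--     return "".join(out)
-- ===== Notes on version B (the rewrite author's own statement) =====
-- stated objective: alternative
-- what changed: Replaces A's square-by-square loop with its running empty-counter and per-index %8/63 checks by an event-driven algorithm: precompute the rank-boundary positions and the occupied-square positions, merge the two lists with two pointers, and derive each empty-run count arithmetically from the gap between consecutive event positions.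
import Mathlib
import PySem

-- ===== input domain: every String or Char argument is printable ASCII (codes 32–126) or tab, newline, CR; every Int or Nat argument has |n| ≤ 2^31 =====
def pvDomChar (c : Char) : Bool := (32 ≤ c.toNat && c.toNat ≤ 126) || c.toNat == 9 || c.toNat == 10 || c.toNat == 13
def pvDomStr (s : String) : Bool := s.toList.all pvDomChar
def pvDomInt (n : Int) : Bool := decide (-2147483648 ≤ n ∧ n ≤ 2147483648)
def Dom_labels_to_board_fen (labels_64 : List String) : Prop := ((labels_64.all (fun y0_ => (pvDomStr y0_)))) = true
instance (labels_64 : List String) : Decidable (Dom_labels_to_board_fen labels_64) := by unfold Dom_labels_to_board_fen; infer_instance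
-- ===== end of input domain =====

-- B replaces A's square-by-square loop with its running empty-counter by a two-pointer merge of
-- two precomputed event lists (rank boundaries and occupied squares), computing empty-run counts
-- arithmetically from positions; same return value on every input (objective: alternative).

-- ===== PORT A =====
-- A's for-loop over enumerate(labels_64) as a structural recursion carrying (i, fen, empty);
-- fen is built as a List Char (PySem style) and wrapped into a String at the end.
def goA : List String → Nat → List Char → Int → List Char
  | [], _, fen, _ => fen
  | lbl :: rest, i, fen, empty =>
    let p1 : List Char × Int :=
      if lbl = "empty" ∨ lbl = "X" then (fen, empty + 1)
      else ((if empty ≠ 0 then fen ++ PySem.Int.toChars empty else fen) ++ lbl.toList, 0)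
    let p2 : List Char × Int :=
      if (i + 1) % 8 = 0 then
        let p15 : List Char × Int := if p1.2 ≠ 0 then (p1.1 ++ PySem.Int.toChars p1.2, 0) else p1
        if i ≠ 63 then (p15.1 ++ ['/'], p15.2) else p15
      else p1
    goA rest (i + 1) p2.1 p2.2

def labels_to_board_fen (labels_64 : List String) : String :=
  String.ofList (goA labels_64 0 [] 0)

-- ===== PORT B =====
-- B's while-loop: the two index pointers over bounds/pieces become structural recursion on the
-- two suffix lists; fen is built as a List Char.
def mergeB : List Int → List (Int × String) → Int → List Char → List Char
  | [], [], _, fen => fen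
  | pos :: bs, [], run, fen =>
    mergeB bs [] pos
      ((fen ++ (if pos > run then PySem.Int.toChars (pos - run) else []))
        ++ (if pos ≠ 64 then ['/'] else []))
  | [], (pos, lbl) :: ps, run, fen =>
    mergeB [] ps (pos + 1)
      ((fen ++ (if pos > run then PySem.Int.toChars (pos - run) else [])) ++ lbl.toList)
  | pos :: bs, (ppos, lbl) :: ps, run, fen =>
    if pos ≤ ppos then
      mergeB bs ((ppos, lbl) :: ps) pos
        ((fen ++ (if pos > run then PySem.Int.toChars (pos - run) else []))
          ++ (if pos ≠ 64 then ['/'] else []))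
    else
      mergeB (pos :: bs) ps (ppos + 1)
        ((fen ++ (if ppos > run then PySem.Int.toChars (ppos - run) else [])) ++ lbl.toList)
  termination_by bs ps => bs.length + ps.length

def labels_to_board_fen_alt (labels_64 : List String) : String :=
  let n : Int := (labels_64.length : Int)
  let bounds : List Int := (PySem.List.pyRange 1 (PySem.Int.floordiv n 8 + 1) 1).map (fun k => 8 * k)
  let pieces : List (Int × String) :=
    (PySem.List.enumerate labels_64 0).filter (fun t => ¬(t.2 = "empty" ∨ t.2 = "X"))
  String.ofList (mergeB bounds pieces 0 [])

-- ===== PRECONDITION & SPEC =====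
def Spec_labels_to_board_fen (labels_64 : List String) (out : String) : Prop := out = labels_to_board_fen_alt labels_64
instance (labels_64 : List String) (out : String) : Decidable (Spec_labels_to_board_fen labels_64 out) := by unfold Spec_labels_to_board_fen; infer_instance

-- ===== CLAIM (what is proved, stated in full; the proofs are below) =====
def Claim_equal_labels_to_board_fen : Prop := ∀ (labels_64 : List String), Dom_labels_to_board_fen labels_64 → Spec_labels_to_board_fen labels_64 (labels_to_board_fen labels_64)

-- ===== LEMMAS AND PROOFS =====

-- one bound-pointer step of B's while loop, valid whenever every remaining piece is at or past pos
theorem mergeB_bound_step (pos : Int) (bs : List Int) (ps : List (Int × String)) (run : Int)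
    (fen : List Char) (h : ∀ q ∈ ps, pos ≤ q.1) :
    mergeB (pos :: bs) ps run fen =
      mergeB bs ps pos
        ((fen ++ (if pos > run then PySem.Int.toChars (pos - run) else []))
          ++ (if pos ≠ 64 then ['/'] else [])) := by
  cases ps with
  | nil => simp only [mergeB]
  | cons q ps' =>
    obtain ⟨ppos, l⟩ := q
    simp only [mergeB]
    rw [if_pos (h _ (List.mem_cons_self ..))]

-- one piece-pointer step of B's while loop, valid whenever every remaining bound is past ppos
theorem mergeB_piece_step (bs : List Int) (ppos : Int) (lbl : String) (ps : List (Int × String))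
    (run : Int) (fen : List Char) (h : ∀ x ∈ bs, ppos < x) :
    mergeB bs ((ppos, lbl) :: ps) run fen =
      mergeB bs ps (ppos + 1)
        ((fen ++ (if ppos > run then PySem.Int.toChars (ppos - run) else [])) ++ lbl.toList) := by
  cases bs with
  | nil => simp only [mergeB]
  | cons pos bs' =>
    simp only [mergeB]
    rw [if_neg (not_le.mpr (h _ (List.mem_cons_self ..)))]

theorem pieces_lb (l : List String) (s : Int) (q : Int × String)
    (hq : q ∈ (PySem.List.enumerate l s).filter (fun t => ¬(t.2 = "empty" ∨ t.2 = "X"))) :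
    s ≤ q.1 := by
  have hq' := List.mem_of_mem_filter hq
  rw [PySem.List.mem_enumerate_iff] at hq'
  obtain ⟨k, hk, rfl⟩ := hq'
  simp

theorem bounds_lb (a b x : Int) (hx : x ∈ (PySem.List.pyRange a b 1).map (fun k => 8 * k)) :
    8 * a ≤ x := by
  obtain ⟨k, hk, rfl⟩ := List.mem_map.mp hx
  have := (PySem.List.mem_pyRange_one).mp hk
  omega

theorem main_lemma (l : List String) (s run : Nat) (fen : List Char) (hrun : run ≤ s) :
    goA l s fen ((s : Int) - (run : Int)) =
      mergeB (((PySem.List.pyRange (↑(s / 8) + 1) (↑((s + l.length) / 8) + 1) 1).map (fun k => 8 * k)))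
        ((PySem.List.enumerate l (s : Int)).filter (fun t => ¬(t.2 = "empty" ∨ t.2 = "X")))
        (run : Int) fen := by
  induction l generalizing s run fen with
  | nil =>
    simp only [goA, List.length_nil, Nat.add_zero, PySem.List.enumerate_nil, List.filter_nil]
    rw [PySem.List.pyRange_one_eq_nil (by omega)]
    simp only [List.map_nil, mergeB]
  | cons lbl rest ih =>
    have hlen : s + (lbl :: rest).length = s + 1 + rest.length := by simp; omega
    rw [hlen]
    rw [PySem.List.enumerate_cons, List.filter_cons]
    have happ : ∀ (F T : List Char) (c : Prop) (_ : Decidable c),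
        (if c then F ++ T else F) = F ++ (if c then T else []) := by
      intro F T c _
      split_ifs <;> simp
    have hsplit : ∀ (F : List Char), (if s ≠ 63 then (F ++ ['/'], (0:Int)) else (F, 0))
        = (F ++ (if s ≠ 63 then ['/'] else []), 0) := by
      intro F
      split_ifs <;> simp
    have hslash : (if ((s : Int) + 1) ≠ 64 then (['/'] : List Char) else [])
        = (if s ≠ 63 then ['/'] else []) := by
      by_cases h63 : s = 63
      · subst h63
        norm_num
      · rw [if_pos (by omega : ((s : Int) + 1) ≠ 64), if_pos h63]
    by_cases he : lbl = "empty" ∨ lbl = "X"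
    · -- empty square
      rw [if_neg (by simp [he])]
      by_cases hb : (s + 1) % 8 = 0
      · -- row boundary after this square
        have hle : s / 8 + 1 ≤ (s + 1 + rest.length) / 8 := by
          have h1 : (s + 1) / 8 ≤ (s + 1 + rest.length) / 8 := Nat.div_le_div_right (by omega)
          omega
        rw [PySem.List.pyRange_one_cons (by push_cast; omega), List.map_cons]
        rw [mergeB_bound_step _ _ _ _ _ (by
          intro q hq
          have := pieces_lb rest ((s : Int) + 1) q hq
          omega)]
        rw [show (8 : Int) * (((s / 8 : Nat) : Int) + 1) = ((s : Int) + 1) by push_cast; omega]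
        rw [if_pos (by omega : ((s : Int) + 1 > (run : Int))), hslash]
        simp only [goA, he, if_pos, hb]
        rw [if_pos (by omega : ((s : Int) - (run : Int) + 1 ≠ 0))]
        simp only [hsplit]
        have hdiv8 : (s + 1) / 8 = s / 8 + 1 := by omega
        have hih := ih (s + 1) (s + 1)
          ((fen ++ PySem.Int.toChars ((s : Int) + 1 - (run : Int))) ++ (if s ≠ 63 then ['/'] else []))
          (le_refl _)
        simp only [sub_self, hdiv8] at hih
        push_cast at hih ⊢
        rw [show (s : Int) - (run : Int) + 1 = (s : Int) + 1 - (run : Int) by ring]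
        exact hih
      · -- no boundary
        simp only [goA, he, if_pos, if_neg hb]
        have hdiv8 : (s + 1) / 8 = s / 8 := by omega
        have hih := ih (s + 1) run fen (by omega)
        simp only [hdiv8] at hih
        push_cast at hih ⊢
        rw [show (s : Int) - (run : Int) + 1 = (s : Int) + 1 - (run : Int) by ring]
        exact hih
    · -- piece
      rw [if_pos (by simp [he])]
      have hblb : ∀ x ∈ (PySem.List.pyRange (((s / 8 : Nat) : Int) + 1)
          (((((s + 1 + rest.length) / 8 : Nat)) : Int) + 1) 1).map (fun k => (8 : Int) * k),
          ((s : Int), lbl).1 < x := by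
        intro x hx
        have := bounds_lb _ _ _ hx
        push_cast at this ⊢
        omega
      rw [mergeB_piece_step _ _ _ _ _ _ hblb]
      rw [show (if ((s : Int), lbl).1 > (run : Int)
            then PySem.Int.toChars (((s : Int), lbl).1 - (run : Int)) else [])
          = (if (s : Int) - (run : Int) ≠ 0 then PySem.Int.toChars ((s : Int) - (run : Int)) else [])
        from by
        by_cases hc : (s : Int) - (run : Int) ≠ 0
        · rw [if_pos hc, if_pos (by simp only []; omega)]
        · rw [if_neg hc, if_neg (by simp only []; omega)]]
      by_cases hb : (s + 1) % 8 = 0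
      · -- piece then boundary
        have hle : s / 8 + 1 ≤ (s + 1 + rest.length) / 8 := by
          have h1 : (s + 1) / 8 ≤ (s + 1 + rest.length) / 8 := Nat.div_le_div_right (by omega)
          omega
        rw [PySem.List.pyRange_one_cons (by push_cast; omega), List.map_cons]
        rw [mergeB_bound_step _ _ _ _ _ (by
          intro q hq
          have := pieces_lb rest ((s : Int) + 1) q hq
          omega)]
        rw [show (8 : Int) * (((s / 8 : Nat) : Int) + 1) = ((s : Int) + 1) by push_cast; omega]
        rw [if_neg (by omega : ¬((s : Int) + 1 > ((s : Int), lbl).1 + 1)), hslash]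
        simp only [goA, he, if_false, hb, if_pos]
        rw [if_neg (by omega : ¬((0 : Int) ≠ 0))]
        simp only [happ, hsplit]
        have hdiv8 : (s + 1) / 8 = s / 8 + 1 := by omega
        have hih := ih (s + 1) (s + 1)
          (((fen ++ (if (s : Int) - (run : Int) ≠ 0 then PySem.Int.toChars ((s : Int) - (run : Int)) else []))
            ++ lbl.toList) ++ (if s ≠ 63 then ['/'] else []))
          (le_refl _)
        simp only [sub_self, hdiv8] at hih
        push_cast at hih
        simp only [List.append_assoc] at hih ⊢
        exact hih
      · -- piece, no boundary
        simp only [goA, he, if_false, if_neg hb]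
        simp only [happ]
        have hdiv8 : (s + 1) / 8 = s / 8 := by omega
        have hih := ih (s + 1) (s + 1)
          ((fen ++ (if (s : Int) - (run : Int) ≠ 0 then PySem.Int.toChars ((s : Int) - (run : Int)) else []))
            ++ lbl.toList)
          (le_refl _)
        simp only [sub_self, hdiv8] at hih
        push_cast at hih ⊢
        simp only [List.append_assoc] at hih ⊢
        exact hih

-- ===== VERDICT (by name: the statement is the Claim_ definition above) =====
theorem labels_to_board_fen_spec : Claim_equal_labels_to_board_fen := by
  intro l _
  unfold Spec_labels_to_board_fen labels_to_board_fen labels_to_board_fen_alt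
  have h := main_lemma l 0 0 [] (le_refl 0)
  simp only [Nat.cast_zero, sub_self, Nat.zero_add, Nat.zero_div] at h
  have hdiv : PySem.Int.floordiv ((l.length : Nat) : Int) 8 = ((l.length / 8 : Nat) : Int) := by
    rw [PySem.Int.floordiv_eq_ediv_of_pos (by omega)]
    omega
  simp only [hdiv]
  rw [show ((0 : Int) + 1) = 1 by norm_num] at h
  rw [h]
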